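-- pv_equiv track=rewrite | github.com/johnflavin/holdem | holdem.py | straightIndex
-- ===== SOURCE A (Python) =====
-- def straightIndex(values):
-- 	#Method returns a -2 if no straight is found. Any other value
-- 	#is the index of the lowest card in the straight (with a -1 returned
-- 	#if the hand has a low-Ace straight, since Aces are stored high)
-- 	straight_index = -2
--
-- 	#We test every five-card window to see if they are in numerical order.
-- 	#This will catch everything except the low-Ace case.
-- 	for i in range(len(values) - 4):
-- 		if all( [values[i+j]+1 == values[i+j+1] for j in range(4)] ):
-- 			straight_index = i
--
-- 	#If we have already found a straight, then we won't find a higher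
-- 	#valued one by moving the Ace down. If we have not, we should check.
-- 	if straight_index == -2 and values[-1] == 12:
--
-- 		#We move the Ace to the bottom of the list and everything else up one,
-- 		#then we promote all the values up one mod 13 (thus the Ace which
-- 		#was 12 goes to 0, the two was 0 goes to 1, etc.) and test again
--
-- 		tempvalues = [ (values[i-1]+1)%13 for i in range(len(values)) ]
-- 		for i in range(len(tempvalues) - 4):
-- 			if all( [tempvalues[i+j]+1 == tempvalues[i+j+1] for j in range(4)] ):
-- 				straight_index = -1
--
-- 	return straight_index
-- ===== SOURCE B (Python) =====
-- def straightIndex(values):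
--     # Single forward pass maintaining the length of the current run of
--     # consecutive values; the last window of length >= 5 wins, like A.
--     def scan(vals):
--         idx, run = -2, 1
--         for i in range(1, len(vals)):
--             run = run + 1 if vals[i - 1] + 1 == vals[i] else 1
--             if run >= 5:
--                 idx = i - 4
--         return idx
--
--     straight_index = scan(values)
--     if straight_index == -2 and values and values[-1] == 12:
--         tempvalues = [(values[i - 1] + 1) % 13 for i in range(len(values))]
--         if scan(tempvalues) != -2:
--             straight_index = -1
--     return straight_index
-- ===== Notes on version B (the rewrite author's own statement) =====
-- stated objective: simpler
-- what changed: Replaces A's every-five-card-window scan (each window re-tested from scratch with an inner range(4) pass, and indexing via values[i+j]) by a single forward pass over adjacent pairs that maintains the length of the current run of consecutive values, recording the window start whenever the run reaches 5; the low-Ace rotation retest reuses the same single pass.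
import Mathlib
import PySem

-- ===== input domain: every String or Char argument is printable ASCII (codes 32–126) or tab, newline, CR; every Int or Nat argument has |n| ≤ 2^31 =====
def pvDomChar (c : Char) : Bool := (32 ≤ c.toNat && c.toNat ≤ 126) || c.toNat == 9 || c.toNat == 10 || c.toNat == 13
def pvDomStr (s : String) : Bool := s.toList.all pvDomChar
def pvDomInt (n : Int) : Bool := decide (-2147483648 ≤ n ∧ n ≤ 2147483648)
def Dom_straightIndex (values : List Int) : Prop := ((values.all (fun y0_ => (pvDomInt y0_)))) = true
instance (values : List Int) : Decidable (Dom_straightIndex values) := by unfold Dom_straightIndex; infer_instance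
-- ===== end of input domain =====

-- B replaces A's nested every-five-card-window scan with a single forward pass
-- maintaining the current run length of consecutive values (objective: simpler).

-- ===== PORT A =====
def straightIndex (values : List Int) : Int :=
  let s1 :=
    (PySem.List.pyRange 0 ((values.length : Int) - 4) 1).foldl
      (fun acc i =>
        if (PySem.List.pyRange 0 4 1).all
            (fun j => PySem.List.pyGetD values (i + j) 0 + 1 ==
                      PySem.List.pyGetD values (i + j + 1) 0)
        then i else acc) (-2)
  if s1 = -2 ∧ PySem.List.pyGetD values (-1) 0 = 12 then
    let tempvalues :=
      (PySem.List.pyRange 0 (values.length : Int) 1).map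
        (fun i => PySem.Int.mod (PySem.List.pyGetD values (i - 1) 0 + 1) 13)
    (PySem.List.pyRange 0 ((tempvalues.length : Int) - 4) 1).foldl
      (fun acc i =>
        if (PySem.List.pyRange 0 4 1).all
            (fun j => PySem.List.pyGetD tempvalues (i + j) 0 + 1 ==
                      PySem.List.pyGetD tempvalues (i + j + 1) 0)
        then (-1 : Int) else acc) s1
  else s1

-- ===== PORT B =====
-- run-length scan: state (idx, run)
def pvScanB (vals : List Int) : Int :=
  ((PySem.List.pyRange 1 (vals.length : Int) 1).foldl
    (fun (st : Int × Int) i =>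
      let run : Int :=
        if PySem.List.pyGetD vals (i - 1) 0 + 1 == PySem.List.pyGetD vals i 0
        then st.2 + 1 else 1
      ((if 5 ≤ run then i - 4 else st.1), run))
    ((-2 : Int), 1)).1

def straightIndex_alt (values : List Int) : Int :=
  let idx := pvScanB values
  if idx = -2 ∧ values ≠ [] ∧ PySem.List.pyGetD values (-1) 0 = 12 then
    let tempvalues :=
      (PySem.List.pyRange 0 (values.length : Int) 1).map
        (fun i => PySem.Int.mod (PySem.List.pyGetD values (i - 1) 0 + 1) 13)
    if pvScanB tempvalues ≠ -2 then -1 else idx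
  else idx

-- ===== PRECONDITION & SPEC =====
-- Whenever the window scan finds nothing (always so for the empty list) A indexes the
-- last element, so A raises IndexError on the empty list: Pre_ excludes only that input.
def Pre_straightIndex (values : List Int) : Prop := values ≠ []
instance (values : List Int) : Decidable (Pre_straightIndex values) := by
  unfold Pre_straightIndex; infer_instance
def pvWitness_straightIndex : List Int := [0, 1, 2, 3, 4]

def Spec_straightIndex (values : List Int) (out : Int) : Prop := out = straightIndex_alt values
instance (values : List Int) (out : Int) : Decidable (Spec_straightIndex values out) := by
  unfold Spec_straightIndex; infer_instance

-- ===== CLAIM (what is proved, stated in full; the proofs are below) =====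
def Claim_equal_straightIndex : Prop :=
  ∀ (values : List Int), Dom_straightIndex values → Pre_straightIndex values →
    Spec_straightIndex values (straightIndex values)

-- ===== LEMMAS AND PROOFS =====

def pvConsec (vals : List Int) (i : Nat) : Bool :=
  vals.getD i 0 + 1 == vals.getD (i + 1) 0

def pvWin (vals : List Int) (k : Nat) : Bool :=
  pvConsec vals k && pvConsec vals (k + 1) && pvConsec vals (k + 2) && pvConsec vals (k + 3)

def pvLast (f : Nat → Bool) : Nat → Int
  | 0 => -2
  | m + 1 => if f m then (m : Int) else pvLast f m

def pvRun (vals : List Int) : Nat → Nat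
  | 0 => 1
  | i + 1 => if pvConsec vals i then pvRun vals i + 1 else 1

def pvLastR (vals : List Int) : Nat → Int
  | 0 => -2
  | k + 1 => if 5 ≤ pvRun vals (k + 1) then ((k + 1 : Nat) : Int) - 4 else pvLastR vals k

lemma pvRun_pos (vals : List Int) (i : Nat) : 0 < pvRun vals i := by
  cases i with
  | zero => simp [pvRun]
  | succ k => simp only [pvRun]; split <;> omega

lemma pvRun_le (vals : List Int) (i : Nat) : pvRun vals i ≤ i + 1 := by
  induction i with
  | zero => simp [pvRun]
  | succ k ih => simp only [pvRun]; split <;> omega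

lemma pvRun_iff_win (vals : List Int) (k : Nat) :
    5 ≤ pvRun vals (k + 4) ↔ pvWin vals k = true := by
  have hp := pvRun_pos vals k
  have e4 : k + 4 = (k + 3) + 1 := by omega
  have e3 : k + 3 = (k + 2) + 1 := by omega
  have e2 : k + 2 = (k + 1) + 1 := by omega
  rw [e4, pvRun, e3, pvRun, e2, pvRun, pvRun, pvWin]
  rw [← e2, ← e3]
  split_ifs <;> simp_all
  all_goals omega

lemma foldA_last (f : Int → Bool) (m : Nat) :
    (PySem.List.pyRange 0 (m : Int) 1).foldl
      (fun acc i => if f i then i else acc) (-2) = pvLast (fun k => f (k : Int)) m := by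
  induction m with
  | zero => simp [PySem.List.pyRange_one_eq_nil, pvLast]
  | succ k ih =>
    have : ((k + 1 : Nat) : Int) = (k : Int) + 1 := by push_cast; ring
    rw [this, PySem.List.pyRange_one_succ_right (by positivity), List.foldl_append]
    simp only [List.foldl, pvLast, ih]

lemma foldA_any (f : Int → Bool) (m : Nat) (init : Int) :
    (PySem.List.pyRange 0 (m : Int) 1).foldl
      (fun acc i => if f i then (-1 : Int) else acc) init =
      if pvLast (fun k => f (k : Int)) m = -2 then init else -1 := by
  induction m with
  | zero => simp [PySem.List.pyRange_one_eq_nil, pvLast]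
  | succ k ih =>
    have hcast : ((k + 1 : Nat) : Int) = (k : Int) + 1 := by push_cast; ring
    rw [hcast, PySem.List.pyRange_one_succ_right (by positivity), List.foldl_append]
    simp only [List.foldl, pvLast, ih]
    by_cases hf : f (k : Int) = true
    · simp only [if_pos hf]
      rw [if_neg (by omega)]
    · simp only [if_neg hf]

lemma scanB_last (vals : List Int) (k : Nat) :
    ((PySem.List.pyRange 1 ((k : Int) + 1) 1).foldl
      (fun (st : Int × Int) i =>
        let run : Int :=
          if PySem.List.pyGetD vals (i - 1) 0 + 1 == PySem.List.pyGetD vals i 0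
          then st.2 + 1 else 1
        ((if 5 ≤ run then i - 4 else st.1), run))
      ((-2 : Int), 1)) = (pvLastR vals k, (pvRun vals k : Int)) := by
  induction k with
  | zero => simp [PySem.List.pyRange_one_eq_nil, pvLastR, pvRun]
  | succ k ih =>
    have hcast : ((k + 1 : Nat) : Int) + 1 = ((k : Int) + 1) + 1 := by push_cast; ring
    rw [hcast, PySem.List.pyRange_one_succ_right (by omega), List.foldl_append, ih]
    simp only [List.foldl]
    have h1 : (k : Int) + 1 - 1 = (k : Nat) := by omega
    have h2 : (k : Int) + 1 = ((k + 1 : Nat) : Int) := by push_cast; ring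
    rw [h1, h2]
    simp only [PySem.List.pyGetD_natCast]
    have hc : (vals.getD k 0 + 1 == vals.getD (k + 1) 0) = pvConsec vals k := rfl
    rw [hc]
    by_cases hcb : pvConsec vals k = true
    · rw [if_pos hcb]
      have hrun : (pvRun vals k : Int) + 1 = (pvRun vals (k + 1) : Int) := by
        simp [pvRun, hcb]
      rw [hrun]
      have h5 : (5 ≤ (pvRun vals (k + 1) : Int)) ↔ 5 ≤ pvRun vals (k + 1) := by
        exact_mod_cast Iff.rfl
      by_cases hge : 5 ≤ pvRun vals (k + 1)
      · rw [if_pos (h5.2 hge), pvLastR, if_pos hge]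
      · rw [if_neg (fun h => hge (h5.1 h)), pvLastR, if_neg hge]
    · rw [if_neg hcb]
      have hrun : (1 : Int) = (pvRun vals (k + 1) : Int) := by simp [pvRun, hcb]
      have hge : ¬ 5 ≤ pvRun vals (k + 1) := by
        have : pvRun vals (k + 1) = 1 := by exact_mod_cast hrun.symm
        omega
      rw [if_neg (by omega), pvLastR, if_neg hge, hrun]

lemma pvLastR_small (vals : List Int) (j : Nat) (h : j ≤ 3) : pvLastR vals j = -2 := by
  have hb : ∀ i : Nat, i ≤ 3 → ¬ 5 ≤ pvRun vals i := by
    intro i hi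
    have := pvRun_le vals i
    omega
  interval_cases j <;>
    simp [pvLastR, hb 1 (by omega), hb 2 (by omega), hb 3 (by omega)]

lemma pvLastR_eq_pvLast (vals : List Int) (m : Nat) :
    pvLastR vals (m + 3) = pvLast (pvWin vals) m := by
  induction m with
  | zero => simp [pvLast, pvLastR_small vals 3 (by omega)]
  | succ k ih =>
    show pvLastR vals (k + 3 + 1) = _
    rw [pvLastR]
    have h4 : k + 3 + 1 = k + 4 := by omega
    rw [h4]
    simp only [pvLast]
    by_cases hw : pvWin vals k = true
    · rw [if_pos ((pvRun_iff_win vals k).2 hw), if_pos hw]; push_cast; ring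
    · rw [if_neg (fun hr => hw ((pvRun_iff_win vals k).1 hr)), if_neg hw, ih]

lemma scanB_eq (vals : List Int) (h : 1 ≤ vals.length) :
    pvScanB vals = pvLast (pvWin vals) (vals.length - 4) := by
  unfold pvScanB
  have hcast : (vals.length : Int) = ((vals.length - 1 : Nat) : Int) + 1 := by
    push_cast [Nat.cast_sub h]
    ring
  rw [hcast, scanB_last vals (vals.length - 1)]
  rcases Nat.lt_or_ge vals.length 4 with h4 | h4
  · have hm : vals.length - 4 = 0 := by omega
    rw [hm]
    have := pvLastR_small vals (vals.length - 1) (by omega)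
    simp [this, pvLast]
  · have hm : vals.length - 1 = (vals.length - 4) + 3 := by omega
    rw [hm, pvLastR_eq_pvLast]

lemma winA_eq (vals : List Int) (k : Nat) :
    ((PySem.List.pyRange 0 4 1).all
      (fun j => PySem.List.pyGetD vals ((k : Int) + j) 0 + 1 ==
                PySem.List.pyGetD vals ((k : Int) + j + 1) 0)) = pvWin vals k := by
  have hr : PySem.List.pyRange 0 4 1 = [0, 1, 2, 3] := by decide
  have p : ∀ (m : Nat), PySem.List.pyGetD vals ((k : Int) + (m : Int)) 0 = vals.getD (k + m) 0 := by
    intro m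
    rw [show (k : Int) + (m : Int) = ((k + m : Nat) : Int) by push_cast; ring,
        PySem.List.pyGetD_natCast]
  have p0 : PySem.List.pyGetD vals (k : Int) 0 = vals.getD k 0 := by
    have := p 0
    simp only [Nat.cast_zero, add_zero] at this
    exact this
  have p1 := p 1; have p2 := p 2; have p3 := p 3; have p4 := p 4
  push_cast at p1 p2 p3 p4
  rw [hr]
  simp only [List.all_cons, List.all_nil, Bool.and_true, add_zero]
  rw [show ((k : Int) + 1 + 1) = (k : Int) + 2 by ring,
      show ((k : Int) + 2 + 1) = (k : Int) + 3 by ring,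
      show ((k : Int) + 3 + 1) = (k : Int) + 4 by ring,
      p0, p1, p2, p3, p4]
  simp [pvWin, pvConsec, Bool.and_assoc, show k + 1 + 1 = k + 2 by omega,
        show k + 2 + 1 = k + 3 by omega, show k + 3 + 1 = k + 4 by omega]

lemma foldA_eq (vals : List Int) :
    (PySem.List.pyRange 0 ((vals.length : Int) - 4) 1).foldl
      (fun acc i =>
        if (PySem.List.pyRange 0 4 1).all
            (fun j => PySem.List.pyGetD vals (i + j) 0 + 1 ==
                      PySem.List.pyGetD vals (i + j + 1) 0)
        then i else acc) (-2) = pvLast (pvWin vals) (vals.length - 4) := by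
  rcases Nat.lt_or_ge vals.length 4 with h | h
  · rw [PySem.List.pyRange_one_eq_nil (a := 0) (b := (vals.length : Int) - 4) (by omega)]
    have h0 : vals.length - 4 = 0 := by omega
    simp [h0, pvLast]
  · have hc : (vals.length : Int) - 4 = ((vals.length - 4 : Nat) : Int) := by
      rw [Nat.cast_sub h]; norm_num
    rw [hc, foldA_last]
    exact congrArg (fun g => pvLast g (vals.length - 4)) (funext fun k => winA_eq vals k)

lemma foldA2_eq (vals : List Int) (init : Int) :
    (PySem.List.pyRange 0 ((vals.length : Int) - 4) 1).foldl
      (fun acc i =>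
        if (PySem.List.pyRange 0 4 1).all
            (fun j => PySem.List.pyGetD vals (i + j) 0 + 1 ==
                      PySem.List.pyGetD vals (i + j + 1) 0)
        then (-1 : Int) else acc) init =
      if pvLast (pvWin vals) (vals.length - 4) = -2 then init else -1 := by
  rcases Nat.lt_or_ge vals.length 4 with h | h
  · rw [PySem.List.pyRange_one_eq_nil (a := 0) (b := (vals.length : Int) - 4) (by omega)]
    have h0 : vals.length - 4 = 0 := by omega
    simp [h0, pvLast]
  · have hc : (vals.length : Int) - 4 = ((vals.length - 4 : Nat) : Int) := by
      rw [Nat.cast_sub h]; norm_num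
    rw [hc, foldA_any,
        congrArg (fun g => pvLast g (vals.length - 4)) (funext fun k => winA_eq vals k)]

-- ===== VERDICT (by name: the statement is the Claim_ definition above) =====
theorem straightIndex_spec : Claim_equal_straightIndex := by
  intro values _ hpre
  have hn : 0 < values.length := List.length_pos_of_ne_nil hpre
  show straightIndex values = straightIndex_alt values
  unfold straightIndex straightIndex_alt
  simp only []
  rw [foldA_eq values, scanB_eq values hn]
  set T := List.map (fun i => PySem.Int.mod (PySem.List.pyGetD values (i - 1) 0 + 1) 13)
    (PySem.List.pyRange 0 (values.length : Int) 1) with hT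
  have htl : T.length = values.length := by
    rw [hT, List.length_map, PySem.List.length_pyRange_one]
    omega
  rw [foldA2_eq T, scanB_eq T (by omega)]
  have hne : values ≠ [] := hpre
  split_ifs <;> first | rfl | tauto
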